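-- pv_equiv track=rewrite | github.com/felipeyousoro/WatanaFlex | Automata/build_transitions.py | get_transitions_from_brackets
-- ===== SOURCE A (Python) =====
-- SLASH_CHARS = ['\'', '\"', '\\', '[', ']', '(', ')', '^', '$', '?', '*', '+', '.', '|', '{', '}']
--
-- def get_transition_from_slash(char: str) -> str:
--     if char in SLASH_CHARS:
--         return char
--     if char == 't':
--         return '\t'
--     elif char == 'n':
--         return '\n'
--     elif char == 'r':
--         return '\r'
--     raise Exception(f'Invalid slash character: {char}')
--
-- def get_transitions_from_brackets(brackets: str) -> list[str]:
--     transitions: list[str] = []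
--
--     # if brackets[1] == '^':
--     #     for i in range(ord(brackets[2]), ord(brackets[4]) + 1):
--     #         transitions.append(chr(i))
--
--     i = 0
--     while i < len(brackets):
--         char = brackets[i]
--         if char == '^' and i == 0:
--             i += 1
--             continue
--         if char != '\\':
--             # If there is a '-' after the current char, then it is a range
--             if i + 1 < len(brackets) and brackets[i + 1] == '-':
--                 for j in range(ord(char), ord(brackets[i + 2]) + 1):
--                     transitions.append(chr(j))
--                 i += 2
--             else:
--                 transitions.append(char)
--         else:
--             transitions.append(get_transition_from_slash(brackets[i + 1]))
--             i += 1
--         i += 1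
--
--     if brackets[0] == '^':
--         transitions = [chr(i) for i in range(256) if chr(i) not in transitions]
--
--     return transitions
-- ===== SOURCE B (Python) =====
-- # B: two-phase decomposition — tokenize the bracket body once, then expand tokens;
-- # complement via a set; same return values as A wherever A returns.
-- _ESCAPES = {c: c for c in ['\'', '\"', '\\', '[', ']', '(', ')', '^', '$', '?', '*', '+', '.', '|', '{', '}']}
-- _ESCAPES.update({'t': '\t', 'n': '\n', 'r': '\r'})
--
-- def _tokenize(body: str):
--     tokens = []
--     i = 0
--     while i < len(body):
--         c = body[i]
--         if c == '\\':
--             e = body[i + 1]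
--             if e not in _ESCAPES:
--                 raise Exception(f'Invalid slash character: {e}')
--             tokens.append(('esc', _ESCAPES[e]))
--             i += 2
--         elif i + 1 < len(body) and body[i + 1] == '-':
--             tokens.append(('range', c, body[i + 2]))
--             i += 3
--         else:
--             tokens.append(('plain', c))
--             i += 1
--     return tokens
--
-- def get_transitions_from_brackets(brackets: str) -> list[str]:
--     negated = brackets.startswith('^')
--     body = brackets[1:] if negated else brackets
--     transitions: list[str] = []
--     for t in _tokenize(body):
--         if t[0] == 'range':
--             transitions.extend(chr(j) for j in range(ord(t[1]), ord(t[2]) + 1))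
--         else:
--             transitions.append(t[1])
--     if negated:
--         excluded = set(transitions)
--         return [chr(j) for j in range(256) if chr(j) not in excluded]
--     return transitions
-- ===== Notes on version B (the rewrite author's own statement) =====
-- stated objective: alternative
-- what changed: B splits A's interleaved index-walk into two phases - a single tokenizing pass producing typed tokens (escape/range/plain) followed by a token-expansion pass - and computes the negation complement against a set instead of rescanning the transitions list for each of the 256 candidate characters.
-- outside the precondition, e.g. on get_transitions_from_brackets(''): A raises IndexError, B returns []; on get_transitions_from_brackets('\\'): A raises IndexError, B raises IndexError
import Mathlib
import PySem

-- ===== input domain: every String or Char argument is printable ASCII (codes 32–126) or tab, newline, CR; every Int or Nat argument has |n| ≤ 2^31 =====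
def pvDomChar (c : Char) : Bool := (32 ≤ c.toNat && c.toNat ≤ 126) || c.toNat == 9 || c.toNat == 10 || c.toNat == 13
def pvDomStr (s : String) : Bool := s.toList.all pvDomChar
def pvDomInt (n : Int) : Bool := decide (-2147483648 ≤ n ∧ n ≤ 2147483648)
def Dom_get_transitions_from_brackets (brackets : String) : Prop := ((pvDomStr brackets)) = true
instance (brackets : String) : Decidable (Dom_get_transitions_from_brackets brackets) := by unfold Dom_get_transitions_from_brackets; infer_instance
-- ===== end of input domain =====

-- B re-implements A as a two-phase decomposition (tokenize the bracket body once, then expand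
-- the tokens; negated complement via a set); same return value as A wherever A returns.

-- ===== PORT A =====

def slashChars : List Char :=
  ['\'', '\"', '\\', '[', ']', '(', ')', '^', '$', '?', '*', '+', '.', '|', '{', '}']
def get_transition_from_slash (c : Char) : Option Char :=
  if c ∈ slashChars then some c
  else if c = 't' then some '\t'
  else if c = 'n' then some '\n'
  else if c = 'r' then some '\r'
  else none

def pyCharRange (lo hi : Nat) : List String :=
  (List.range' lo (hi + 1 - lo)).map (fun j => String.singleton (Char.ofNat j))

def loopA (cs : List Char) : Nat → Nat → List String → List String
  | 0, _, acc => acc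
  | fuel + 1, i, acc =>
    if h : i < cs.length then
      let c := cs[i]
      if c = '^' ∧ i = 0 then loopA cs fuel (i + 1) acc
      else if c ≠ '\\' then
        if i + 1 < cs.length ∧ cs.getD (i + 1) ' ' = '-' then
          loopA cs fuel (i + 3) (acc ++ pyCharRange c.toNat (cs.getD (i + 2) ' ').toNat)
        else loopA cs fuel (i + 1) (acc ++ [String.singleton c])
      else
        match get_transition_from_slash (cs.getD (i + 1) ' ') with
        | some e => loopA cs fuel (i + 2) (acc ++ [String.singleton e])
        | none => acc
    else acc

def get_transitions_from_brackets (brackets : String) : List String :=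
  let cs := brackets.toList
  let transitions := loopA cs cs.length 0 []
  if cs.getD 0 ' ' = '^' then
    ((List.range 256).map (fun j => String.singleton (Char.ofNat j))).filter
      (fun s => decide (s ∉ transitions))
  else transitions

-- ===== PORT B =====

inductive Tok
  | esc : Char → Tok
  | rng : Char → Char → Tok
  | plain : Char → Tok
deriving DecidableEq, Repr

def escapes : List (Char × Char) :=
  slashChars.map (fun c => (c, c)) ++ [('t', '\t'), ('n', '\n'), ('r', '\r')]

def tokB (body : List Char) : Nat → Nat → List Tok → List Tok
  | 0, _, acc => acc
  | fuel + 1, i, acc =>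
    if h : i < body.length then
      let c := body[i]
      if c = '\\' then
        match List.lookup (body.getD (i + 1) ' ') escapes with
        | some e => tokB body fuel (i + 2) (acc ++ [Tok.esc e])
        | none => acc
      else if i + 1 < body.length ∧ body.getD (i + 1) ' ' = '-' then
        tokB body fuel (i + 3) (acc ++ [Tok.rng c (body.getD (i + 2) ' ')])
      else tokB body fuel (i + 1) (acc ++ [Tok.plain c])
    else acc

def expandTok : Tok → List String
  | Tok.rng lo hi => pyCharRange lo.toNat hi.toNat
  | Tok.esc c => [String.singleton c]
  | Tok.plain c => [String.singleton c]

def get_transitions_from_brackets_alt (brackets : String) : List String :=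
  let cs := brackets.toList
  let negated := cs.headD ' ' = '^'
  let body := if negated then cs.drop 1 else cs
  let transitions := (tokB body body.length 0 []).foldl (fun acc t => acc ++ expandTok t) []
  if negated then
    let excluded : PySem.Set String := PySem.Set.ofList transitions
    ((List.range 256).map (fun j => String.singleton (Char.ofNat j))).filter
      (fun s => decide (s ∉ excluded))
  else transitions

-- ===== PRECONDITION & SPEC =====

def validEsc (c : Char) : Bool :=
  c ∈ ['\'', '\"', '\\', '[', ']', '(', ')', '^', '$', '?', '*', '+', '.', '|', '{', '}',
       't', 'n', 'r']

-- well-formedness of a bracket body: every backslash is followed by a valid escape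
-- character, and every range dash has its upper endpoint present
def okBody : List Char → Bool
  | [] => true
  | '\\' :: [] => false
  | '\\' :: c :: rest => validEsc c && okBody rest
  | _ :: '-' :: [] => false
  | _ :: '-' :: _ :: rest => okBody rest
  | _ :: rest => okBody rest

-- Pre_ = exactly the inputs on which the Python A returns (A raises IndexError on the empty
-- string, on a trailing backslash or on a range dash without its endpoint, and it raises
-- Exception on an invalid escape character; B returns the empty list on the empty string).
def Pre_get_transitions_from_brackets (brackets : String) : Prop :=
  brackets.toList ≠ [] ∧
  okBody (if brackets.toList.headD ' ' = '^' then brackets.toList.drop 1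
          else brackets.toList) = true

instance (brackets : String) : Decidable (Pre_get_transitions_from_brackets brackets) := by
  unfold Pre_get_transitions_from_brackets; infer_instance

def pvWitness_get_transitions_from_brackets : String := "a-d\\n^"

def Spec_get_transitions_from_brackets (brackets : String) (out : List String) : Prop :=
  out = get_transitions_from_brackets_alt brackets
instance (brackets : String) (out : List String) :
    Decidable (Spec_get_transitions_from_brackets brackets out) := by
  unfold Spec_get_transitions_from_brackets; infer_instance

-- ===== CLAIM (what is proved, stated in full; the proofs are below) =====
def Claim_equal_get_transitions_from_brackets : Prop :=
  ∀ (brackets : String), Dom_get_transitions_from_brackets brackets →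
    Pre_get_transitions_from_brackets brackets →
    Spec_get_transitions_from_brackets brackets (get_transitions_from_brackets brackets)

-- ===== LEMMAS AND PROOFS =====

lemma lookup_map_pair (l : List Char) (c : Char) :
    List.lookup c (l.map fun x => (x, x)) = if c ∈ l then some c else none := by
  induction l with
  | nil => simp
  | cons x xs ih =>
    by_cases hx : c = x
    · simp [hx]
    · have hb : (c == x) = false := by simp [hx]
      simp [List.lookup, hb, ih, hx]

lemma esc_eq (c : Char) : List.lookup c escapes = get_transition_from_slash c := by
  rw [escapes, List.lookup_append, lookup_map_pair, get_transition_from_slash]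
  by_cases h : c ∈ slashChars
  · simp [h]
  · simp only [h, if_false]
    by_cases ht : c = 't'
    · simp [List.lookup, ht]
    · have hbt : (c == 't') = false := by simp [ht]
      by_cases hn : c = 'n'
      · simp [List.lookup, hn]
      · have hbn : (c == 'n') = false := by simp [hn]
        by_cases hr : c = 'r'
        · simp [List.lookup, hr]
        · have hbr : (c == 'r') = false := by simp [hr]
          simp [List.lookup, hbt, hbn, hbr, ht, hn, hr]

lemma validEsc_iff (c : Char) :
    validEsc c = true ↔ (get_transition_from_slash c).isSome := by
  simp [validEsc, get_transition_from_slash, slashChars]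
  by_cases ht : c = 't' <;> by_cases hn : c = 'n' <;> by_cases hr : c = 'r' <;>
    simp_all

-- structural (drop-based) restatement of A's loop, leading-caret branch removed
def loopS : List Char → List String → List String
  | [], acc => acc
  | '\\' :: rest, acc =>
    match rest with
    | [] => acc
    | c :: rest' =>
      match get_transition_from_slash c with
      | some e => loopS rest' (acc ++ [String.singleton e])
      | none => acc
  | c :: '-' :: rest', acc =>
      loopS (rest'.drop 1) (acc ++ pyCharRange c.toNat (rest'.headD ' ').toNat)
  | c :: rest, acc => loopS rest (acc ++ [String.singleton c])
termination_by l _ => l.length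
decreasing_by all_goals (simp; try omega)

-- structural restatement of Source B's tokenizer
def tokS : List Char → List Tok → List Tok
  | [], acc => acc
  | '\\' :: rest, acc =>
    match rest with
    | [] => acc
    | c :: rest' =>
      match List.lookup c escapes with
      | some e => tokS rest' (acc ++ [Tok.esc e])
      | none => acc
  | c :: '-' :: rest', acc => tokS (rest'.drop 1) (acc ++ [Tok.rng c (rest'.headD ' ')])
  | c :: rest, acc => tokS rest (acc ++ [Tok.plain c])
termination_by l _ => l.length
decreasing_by all_goals (simp; try omega)

lemma tokS_acc : ∀ (n : Nat) (l : List Char), l.length ≤ n →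
    ∀ acc, tokS l acc = acc ++ tokS l [] := by
  intro n
  induction n with
  | zero =>
    intro l hl acc
    have : l = [] := List.length_eq_zero_iff.mp (Nat.le_zero.mp hl)
    subst this; simp [tokS]
  | succ n ih =>
    intro l hl acc
    cases l with
    | nil => simp [tokS]
    | cons c rest =>
      simp only [List.length_cons, Nat.add_le_add_iff_right] at hl
      by_cases hc : c = '\\'
      · subst hc
        cases rest with
        | nil => simp [tokS]
        | cons d rest' =>
          cases he : List.lookup d escapes with
          | some e =>
            simp only [tokS, he, List.nil_append]
            rw [ih rest' (by simp at hl; omega) (acc ++ [Tok.esc e]),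
                ih rest' (by simp at hl; omega) [Tok.esc e]]
            simp
          | none => simp [tokS, he]
      · cases rest with
        | nil => simp [tokS]
        | cons d rest' =>
          by_cases hd : d = '-'
          · subst hd
            simp only [tokS, List.nil_append]
            rw [ih (rest'.drop 1) (by simp at hl ⊢; omega) (acc ++ [Tok.rng c (rest'.headD ' ')]),
                ih (rest'.drop 1) (by simp at hl ⊢; omega) [Tok.rng c (rest'.headD ' ')]]
            simp
          · have hnr : ∀ (r : List Char), d :: rest' = '-' :: r → False := by
              intro r h; injection h with h1 _; exact hd h1
            rw [tokS.eq_5 acc c (d :: rest') hc hnr,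
                tokS.eq_5 [] c (d :: rest') hc hnr,
                ih (d :: rest') (by simp at hl ⊢; omega) (acc ++ [Tok.plain c]),
                ih (d :: rest') (by simp at hl ⊢; omega) ([] ++ [Tok.plain c])]
            simp

lemma loopS_eq_tok : ∀ (n : Nat) (l : List Char), l.length ≤ n → okBody l = true →
    ∀ acc, loopS l acc = acc ++ (tokS l []).flatMap expandTok := by
  intro n
  induction n with
  | zero =>
    intro l hl _ acc
    have : l = [] := List.length_eq_zero_iff.mp (Nat.le_zero.mp hl)
    subst this; simp [tokS, loopS]
  | succ n ih =>
    intro l hl hok acc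
    cases l with
    | nil => simp [tokS, loopS]
    | cons c rest =>
      simp only [List.length_cons, Nat.add_le_add_iff_right] at hl
      by_cases hc : c = '\\'
      · subst hc
        cases rest with
        | nil => simp [okBody] at hok
        | cons d rest' =>
          simp only [okBody, Bool.and_eq_true] at hok
          obtain ⟨hv, hok'⟩ := hok
          obtain ⟨e, he⟩ := Option.isSome_iff_exists.mp ((validEsc_iff d).mp hv)
          have hlk : List.lookup d escapes = some e := (esc_eq d).trans he
          simp only [loopS, tokS, he, hlk, List.nil_append]
          rw [ih rest' (by simp at hl; omega) hok' (acc ++ [String.singleton e]),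
              tokS_acc (n := rest'.length) rest' le_rfl [Tok.esc e]]
          simp [expandTok]
      · cases rest with
        | nil =>
          have hnr : ∀ (r : List Char), ([] : List Char) = '-' :: r → False := by
            intro r h; cases h
          rw [loopS.eq_5 acc c [] hc hnr, tokS.eq_5 [] c [] hc hnr]
          simp [loopS, tokS, expandTok]
        | cons d rest' =>
          by_cases hd : d = '-'
          · subst hd
            cases rest' with
            | nil => simp [okBody] at hok
            | cons e rest'' =>
              have hok' : okBody rest'' = true := by
                simpa [okBody, hc] using hok
              simp only [loopS, tokS, List.nil_append]
              rw [ih (List.drop 1 (e :: rest'')) (by simp at hl ⊢; omega)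
                    (by simpa using hok') _,
                  tokS_acc (n := (List.drop 1 (e :: rest'')).length) _ le_rfl
                    [Tok.rng c ((e :: rest'').headD ' ')]]
              simp [expandTok]
          · have hok' : okBody (d :: rest') = true := by
              cases rest' <;> simpa [okBody, hc, hd] using hok
            have hnr : ∀ (r : List Char), d :: rest' = '-' :: r → False := by
              intro r h; injection h with h1 _; exact hd h1
            rw [loopS.eq_5 acc c (d :: rest') hc hnr, tokS.eq_5 [] c (d :: rest') hc hnr,
                ih (d :: rest') (by simp at hl ⊢; omega) hok' (acc ++ [String.singleton c]),
                tokS_acc (n := (d :: rest').length) _ le_rfl ([] ++ [Tok.plain c])]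
            simp [expandTok]

lemma drop_cons_lt {cs : List Char} {j : Nat} {d : Char} {r : List Char}
    (h : cs.drop j = d :: r) : j < cs.length := by
  by_contra hx
  rw [List.drop_eq_nil_iff.mpr (by omega)] at h
  cases h

lemma drop_add_one {cs : List Char} {j : Nat} {d : Char} {r : List Char}
    (h : cs.drop j = d :: r) : cs.drop (j + 1) = r := by
  rw [← List.tail_drop, h]
  rfl

lemma getE (cs : List Char) (j : Nat) (d : Char) : cs[j]?.getD d = (cs.drop j).headD d := by
  rw [List.headD_eq_head?_getD, List.head?_eq_getElem?, List.getElem?_drop, Nat.add_zero]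

lemma tokB_eq_tokS (body : List Char) :
    ∀ fuel i acc, body.length - i ≤ fuel → tokB body fuel i acc = tokS (body.drop i) acc := by
  intro fuel
  induction fuel with
  | zero =>
    intro i acc hf
    rw [List.drop_eq_nil_iff.mpr (by omega)]
    simp [tokB, tokS]
  | succ fuel ih =>
    intro i acc hf
    by_cases h : i < body.length
    · have hdi : body.drop i = body[i] :: body.drop (i + 1) := List.drop_eq_getElem_cons h
      by_cases hc : body[i] = '\\'
      · -- escape branch
        cases hrest : body.drop (i + 1) with
        | nil =>
          have hlk : List.lookup ' ' escapes = none := by decide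
          rw [hdi, hrest, hc]
          simp [tokB, h, hc, getE, hrest, hlk, tokS]
        | cons d rest' =>
          rw [hdi, hrest, hc]
          cases he : List.lookup d escapes with
          | some e =>
            simp only [tokB, dif_pos h, hc, if_true,
              List.getD_eq_getElem?_getD, getE, hrest, List.headD_cons, he, tokS]
            rw [ih (i + 2) (acc ++ [Tok.esc e]) (by omega),
              show i + 2 = (i + 1) + 1 by omega, drop_add_one hrest]
          | none =>
            simp [tokB, h, hc, getE, hrest, he, tokS]
      · -- not an escape
        cases hrest : body.drop (i + 1) with
        | nil =>
          have hlen : ¬ (i + 1 < body.length) := by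
            have := List.drop_eq_nil_iff.mp hrest; omega
          have hnr : ∀ (r : List Char), ([] : List Char) = '-' :: r → False := by
            intro r hx; cases hx
          rw [hdi, hrest, tokS.eq_5 acc body[i] [] hc hnr]
          simp only [tokB, dif_pos h, if_neg hc, if_neg (by tauto : ¬ (i + 1 < body.length ∧
            body.getD (i + 1) ' ' = '-'))]
          rw [ih (i + 1) (acc ++ [Tok.plain body[i]]) (by omega), hrest]
        | cons d rest' =>
          have hg : body.getD (i + 1) ' ' = d := by
            rw [List.getD_eq_getElem?_getD, getE, hrest, List.headD_cons]
          have hlen : i + 1 < body.length := drop_cons_lt hrest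
          by_cases hd : d = '-'
          · subst hd
            have hg2 : body.getD (i + 2) ' ' = rest'.headD ' ' := by
              rw [List.getD_eq_getElem?_getD, getE, show i + 2 = (i + 1) + 1 by omega,
                drop_add_one hrest]
            rw [hdi, hrest, tokS.eq_4 acc body[i] rest' hc]
            simp only [tokB, dif_pos h, if_neg hc,
              if_pos (⟨hlen, hg⟩ : i + 1 < body.length ∧ body.getD (i + 1) ' ' = '-'), hg2]
            rw [ih (i + 3) (acc ++ [Tok.rng body[i] (rest'.headD ' ')]) (by omega),
              show i + 3 = ((i + 1) + 1) + 1 by omega, ← List.tail_drop,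
              drop_add_one hrest, List.drop_one]
          · have hnr : ∀ (r : List Char), d :: rest' = '-' :: r → False := by
              intro r hx; injection hx with h1 _; exact hd h1
            rw [hdi, hrest, tokS.eq_5 acc body[i] (d :: rest') hc hnr]
            simp only [tokB, dif_pos h, if_neg hc, if_neg (by rw [hg]; tauto : ¬ (i + 1 <
              body.length ∧ body.getD (i + 1) ' ' = '-'))]
            rw [ih (i + 1) (acc ++ [Tok.plain body[i]]) (by omega), hrest]
    · rw [List.drop_eq_nil_iff.mpr (by omega)]
      simp [tokB, h, tokS]

lemma headD_eq_get0 (cs : List Char) (h0 : 0 < cs.length) : cs.headD ' ' = cs[0] := by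
  simp [List.headD_eq_head?_getD, List.head?_eq_getElem?, List.getElem?_eq_getElem h0]

lemma loopA_eq_loopS (cs : List Char) :
    ∀ fuel i acc, cs.length - i ≤ fuel → (i = 0 → cs.headD ' ' ≠ '^') →
      loopA cs fuel i acc = loopS (cs.drop i) acc := by
  intro fuel
  induction fuel with
  | zero =>
    intro i acc hf _
    rw [List.drop_eq_nil_iff.mpr (by omega)]
    simp [loopA, loopS]
  | succ fuel ih =>
    intro i acc hf hcar
    by_cases h : i < cs.length
    · have hdi : cs.drop i = cs[i] :: cs.drop (i + 1) := List.drop_eq_getElem_cons h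
      have hnc : ¬ (cs[i] = '^' ∧ i = 0) := by
        rintro ⟨h1, rfl⟩
        exact hcar rfl (by rw [headD_eq_get0 cs (by omega)]; exact h1)
      by_cases hc : cs[i] = '\\'
      · -- escape branch of A
        cases hrest : cs.drop (i + 1) with
        | nil =>
          have hsl : get_transition_from_slash ' ' = none := by decide
          rw [hdi, hrest, hc]
          simp [loopA, h, hc, List.getD_eq_getElem?_getD, getE, hrest, hsl, loopS]
        | cons d rest' =>
          rw [hdi, hrest, hc]
          cases he : get_transition_from_slash d with
          | some e =>
            simp only [loopA, dif_pos h, hc, ne_eq,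
              not_true_eq_false, if_false, List.getD_eq_getElem?_getD, getE, hrest,
              List.headD_cons, he, loopS]
            rw [ih (i + 2) (acc ++ [String.singleton e]) (by omega)
                  (fun hx => absurd hx (by omega)),
              show i + 2 = (i + 1) + 1 by omega, drop_add_one hrest]
            simp
          | none =>
            simp [loopA, h, hc, List.getD_eq_getElem?_getD, getE, hrest, he, loopS]
      · -- plain / range branch of A
        have hne : cs[i] ≠ '\\' := hc
        cases hrest : cs.drop (i + 1) with
        | nil =>
          have hlen : ¬ (i + 1 < cs.length) := by
            have := List.drop_eq_nil_iff.mp hrest; omega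
          have hnr : ∀ (r : List Char), ([] : List Char) = '-' :: r → False := by
            intro r hx; cases hx
          rw [hdi, hrest, loopS.eq_5 acc cs[i] [] hc hnr]
          simp only [loopA, dif_pos h, if_neg hnc, if_pos hne, if_neg (by tauto :
            ¬ (i + 1 < cs.length ∧ cs.getD (i + 1) ' ' = '-'))]
          rw [ih (i + 1) (acc ++ [String.singleton cs[i]]) (by omega)
                (fun hx => absurd hx (by omega)), hrest]
        | cons d rest' =>
          have hg : cs.getD (i + 1) ' ' = d := by
            rw [List.getD_eq_getElem?_getD, getE, hrest, List.headD_cons]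
          have hlen : i + 1 < cs.length := drop_cons_lt hrest
          by_cases hd : d = '-'
          · subst hd
            have hg2 : cs.getD (i + 2) ' ' = rest'.headD ' ' := by
              rw [List.getD_eq_getElem?_getD, getE, show i + 2 = (i + 1) + 1 by omega,
                drop_add_one hrest]
            rw [hdi, hrest, loopS.eq_4 acc cs[i] rest' hc]
            simp only [loopA, dif_pos h, if_neg hnc, if_pos hne,
              if_pos (⟨hlen, hg⟩ : i + 1 < cs.length ∧ cs.getD (i + 1) ' ' = '-'), hg2]
            rw [ih (i + 3) (acc ++ pyCharRange cs[i].toNat ((rest'.headD ' ').toNat))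
                  (by omega) (fun hx => absurd hx (by omega)),
              show i + 3 = ((i + 1) + 1) + 1 by omega, ← List.tail_drop,
              drop_add_one hrest, List.drop_one]
          · have hnr : ∀ (r : List Char), d :: rest' = '-' :: r → False := by
              intro r hx; injection hx with h1 _; exact hd h1
            rw [hdi, hrest, loopS.eq_5 acc cs[i] (d :: rest') hc hnr]
            simp only [loopA, dif_pos h, if_neg hnc, if_pos hne, if_neg (by rw [hg]; tauto :
              ¬ (i + 1 < cs.length ∧ cs.getD (i + 1) ' ' = '-'))]
            rw [ih (i + 1) (acc ++ [String.singleton cs[i]]) (by omega)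
                  (fun hx => absurd hx (by omega)), hrest]
    · rw [List.drop_eq_nil_iff.mpr (by omega)]
      simp [loopA, h, loopS]

theorem main_eq (brackets : String) (hpre : Pre_get_transitions_from_brackets brackets) :
    get_transitions_from_brackets brackets = get_transitions_from_brackets_alt brackets := by
  obtain ⟨hne, hok⟩ := hpre
  obtain ⟨c0, rest, hcs⟩ := List.exists_cons_of_ne_nil hne
  unfold get_transitions_from_brackets get_transitions_from_brackets_alt
  simp only [hcs, List.length_cons, List.headD_cons, List.getD_eq_getElem?_getD,
    List.getElem?_cons_zero, Option.getD_some, List.drop_succ_cons, List.drop_zero,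
    PySem.List.foldl_append_eq_flatMap, List.nil_append]
  rw [hcs, List.headD_cons] at hok
  by_cases hcar : c0 = '^'
  · subst hcar
    simp only [if_true] at hok ⊢
    have hA : loopA ('^' :: rest) (rest.length + 1) 0 [] = loopS rest [] := by
      have h1 : loopA ('^' :: rest) (rest.length + 1) 0 [] =
          loopA ('^' :: rest) rest.length 1 [] := by
        simp [loopA]
      rw [h1, loopA_eq_loopS ('^' :: rest) rest.length 1 []
            (by simp) (fun hx => absurd hx (by omega))]
      simp
    have hB : tokB rest rest.length 0 [] = tokS rest [] := by
      rw [tokB_eq_tokS rest rest.length 0 [] (by omega)]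
      simp
    rw [hA, hB, loopS_eq_tok rest.length rest le_rfl hok, List.nil_append]
    apply List.filter_congr
    intro s _
    simp [PySem.Set.mem_ofList]
  · simp only [if_neg hcar, List.length_cons] at hok ⊢
    have hA : loopA (c0 :: rest) (rest.length + 1) 0 [] = loopS (c0 :: rest) [] := by
      rw [loopA_eq_loopS (c0 :: rest) (rest.length + 1) 0 []
            (by simp) (fun _ => by simpa using hcar)]
      simp
    have hB : tokB (c0 :: rest) (rest.length + 1) 0 [] = tokS (c0 :: rest) [] := by
      rw [tokB_eq_tokS (c0 :: rest) (rest.length + 1) 0 [] (by simp)]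
      simp
    rw [hA, hB, loopS_eq_tok (rest.length + 1) (c0 :: rest) (by simp) hok, List.nil_append]

-- ===== VERDICT (by name: the statement is the Claim_ definition above) =====
theorem get_transitions_from_brackets_spec : Claim_equal_get_transitions_from_brackets := by
  intro brackets _ hpre
  exact main_eq brackets hpre
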